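-- pv_equiv track=rewrite | github.com/sasim042/shelf-shift | server.py | price_bin_label
-- ===== SOURCE A (Python) =====
-- PRICE_BINS = [
--     (None, 5, "<$5"),
--     (5, 10, "$5-10"),
--     (10, 15, "$10-15"),
--     (15, 20, "$15-20"),
--     (20, 30, "$20-30"),
--     (30, 50, "$30-50"),
--     (50, None, "$50+"),
-- ]
--
-- def price_bin_label(price):
--     for low, high, label in PRICE_BINS:
--         if low is None and price < high:
--             return label
--         if high is None and price >= low:
--             return label
--         if low is not None and high is not None and low <= price < high:
--             return label
--     return "Unknown"
-- ===== SOURCE B (Python) =====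
-- BOUNDS = [5, 10, 15, 20, 30, 50]
-- LABELS = ["<$5", "$5-10", "$10-15", "$15-20", "$20-30", "$30-50", "$50+"]
--
-- def price_bin_label(price):
--     lo, hi = 0, len(BOUNDS)
--     while lo < hi:
--         mid = (lo + hi) // 2
--         if price < BOUNDS[mid]:
--             hi = mid
--         else:
--             lo = mid + 1
--     return LABELS[lo]
-- ===== Notes on version B (the rewrite author's own statement) =====
-- stated objective: alternative
-- what changed: Replaces the linear scan over (low, high, label) bin triples with a binary search (hand-written bisect_right) over the sorted cut points [5,10,15,20,30,50] indexing a parallel label table.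
import Mathlib
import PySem

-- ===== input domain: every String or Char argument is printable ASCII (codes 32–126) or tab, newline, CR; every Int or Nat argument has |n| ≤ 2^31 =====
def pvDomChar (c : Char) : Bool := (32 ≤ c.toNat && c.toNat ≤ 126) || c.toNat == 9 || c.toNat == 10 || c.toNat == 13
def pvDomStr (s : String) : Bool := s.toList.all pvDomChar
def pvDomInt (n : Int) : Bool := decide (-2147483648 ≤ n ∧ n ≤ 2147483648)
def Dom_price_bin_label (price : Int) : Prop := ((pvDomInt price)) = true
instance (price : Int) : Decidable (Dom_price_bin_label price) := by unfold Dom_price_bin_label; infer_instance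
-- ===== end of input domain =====

-- B replaces A's linear scan over labelled bin triples by a binary search (hand-written
-- bisect_right) over the sorted cut points indexing a parallel label table (objective: alternative).

-- ===== PORT A =====
def pvPriceBins : List (Option Int × Option Int × String) :=
  [(none, some 5, "<$5"), (some 5, some 10, "$5-10"), (some 10, some 15, "$10-15"),
   (some 15, some 20, "$15-20"), (some 20, some 30, "$20-30"), (some 30, some 50, "$30-50"),
   (some 50, none, "$50+")]

-- the three mutually exclusive 'if' tests of A's loop body, in order
def pvBinHit (price : Int) (low high : Option Int) : Bool :=
  match low, high with
  | none, some h => price < h                 -- low is None and price < high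
  | some l, none => decide (price ≥ l)        -- high is None and price >= low
  | some l, some h => decide (l ≤ price) && decide (price < h)
  | none, none => false

def pvScan (price : Int) : List (Option Int × Option Int × String) → String
  | [] => "Unknown"
  | (low, high, label) :: rest => if pvBinHit price low high then label else pvScan price rest

def price_bin_label (price : Int) : String := pvScan price pvPriceBins

-- ===== PORT B =====
def pvBounds : List Int := [5, 10, 15, 20, 30, 50]
def pvLabels : List String := ["<$5", "$5-10", "$10-15", "$15-20", "$20-30", "$30-50", "$50+"]

-- the while-loop of Source B, guarded by a fuel counter that only makes it total:
-- hi - lo shrinks every iteration, so fuel = hi - lo is always enough;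
-- mid is always in range, so the pyGet? default is never used
def pvBisectGo (price : Int) : Nat → Int → Int → Int
  | 0, lo, _ => lo
  | fuel + 1, lo, hi =>
    if lo < hi then
      let mid := PySem.Int.floordiv (lo + hi) 2
      if price < (PySem.List.pyGet? pvBounds mid).getD 0 then pvBisectGo price fuel lo mid
      else pvBisectGo price fuel (mid + 1) hi
    else lo

def pvBisect (price lo hi : Int) : Int := pvBisectGo price (hi - lo).toNat lo hi

-- the final LABELS[lo]; lo ∈ [0,6] is always in range, so the default is never used
def price_bin_label_alt (price : Int) : String :=
  (PySem.List.pyGet? pvLabels (pvBisect price 0 6)).getD ""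

-- ===== PRECONDITION & SPEC =====
def Spec_price_bin_label (price : Int) (out : String) : Prop := out = price_bin_label_alt price
instance (price : Int) (out : String) : Decidable (Spec_price_bin_label price out) := by unfold Spec_price_bin_label; infer_instance

-- ===== CLAIM (what is proved, stated in full; the proofs are below) =====
def Claim_equal_price_bin_label : Prop := ∀ (price : Int), Dom_price_bin_label price → Spec_price_bin_label price (price_bin_label price)

-- ===== LEMMAS AND PROOFS =====
theorem pvBisect_eval (p : Int) :
    pvBisect p 0 6 =
      if p < 5 then 0 else if p < 10 then 1 else if p < 15 then 2
      else if p < 20 then 3 else if p < 30 then 4 else if p < 50 then 5 else 6 := by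
  show pvBisectGo p 6 0 6 = _
  norm_num [pvBisectGo,
    show PySem.Int.floordiv 6 2 = 3 from by decide,
    show PySem.Int.floordiv 3 2 = 1 from by decide,
    show PySem.Int.floordiv 10 2 = 5 from by decide,
    show PySem.Int.floordiv 1 2 = 0 from by decide,
    show PySem.Int.floordiv 5 2 = 2 from by decide,
    show PySem.Int.floordiv 9 2 = 4 from by decide,
    show (PySem.List.pyGet? pvBounds 0).getD 0 = 5 from by decide,
    show (PySem.List.pyGet? pvBounds 1).getD 0 = 10 from by decide,
    show (PySem.List.pyGet? pvBounds 2).getD 0 = 15 from by decide,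
    show (PySem.List.pyGet? pvBounds 3).getD 0 = 20 from by decide,
    show (PySem.List.pyGet? pvBounds 4).getD 0 = 30 from by decide,
    show (PySem.List.pyGet? pvBounds 5).getD 0 = 50 from by decide]
  split_ifs <;> first | rfl | omega

-- ===== VERDICT (by name: the statement is the Claim_ definition above) =====
theorem price_bin_label_spec : Claim_equal_price_bin_label := by
  intro price _
  unfold Spec_price_bin_label price_bin_label price_bin_label_alt
  rw [pvBisect_eval]
  by_cases h1 : price < 5
  · simp [pvScan, pvPriceBins, pvBinHit, h1,
      show (PySem.List.pyGet? pvLabels 0).getD "" = "<$5" from by decide]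
  · by_cases h2 : price < 10
    · simp [pvScan, pvPriceBins, pvBinHit, h1, h2, show (5:Int) ≤ price from by omega,
        show (PySem.List.pyGet? pvLabels 1).getD "" = "$5-10" from by decide]
    · by_cases h3 : price < 15
      · simp [pvScan, pvPriceBins, pvBinHit, h1, h2, h3, show (10:Int) ≤ price from by omega,
          show (PySem.List.pyGet? pvLabels 2).getD "" = "$10-15" from by decide]
      · by_cases h4 : price < 20
        · simp [pvScan, pvPriceBins, pvBinHit, h1, h2, h3, h4, show (15:Int) ≤ price from by omega,
            show (PySem.List.pyGet? pvLabels 3).getD "" = "$15-20" from by decide]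
        · by_cases h5 : price < 30
          · simp [pvScan, pvPriceBins, pvBinHit, h1, h2, h3, h4, h5,
              show (20:Int) ≤ price from by omega,
              show (PySem.List.pyGet? pvLabels 4).getD "" = "$20-30" from by decide]
          · by_cases h6 : price < 50
            · simp [pvScan, pvPriceBins, pvBinHit, h1, h2, h3, h4, h5, h6,
                show (30:Int) ≤ price from by omega,
                show (PySem.List.pyGet? pvLabels 5).getD "" = "$30-50" from by decide]
            · simp [pvScan, pvPriceBins, pvBinHit, h1, h2, h3, h4, h5, h6,
                show (50:Int) ≤ price from by omega,
                show (PySem.List.pyGet? pvLabels 6).getD "" = "$50+" from by decide]
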